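-- pv_equiv track=rewrite | github.com/mouredev/retos-programacion-2023 | Retos/Reto #28 - EXPRESIÓN MATEMÁTICA [Media]/python/drifterDev.py | analizar_expresion
-- ===== SOURCE A (Python) =====
-- def analizar_expresion(expresion: str) -> bool:
--     simbolos = "+-*/%"
--     expresion = expresion.split()
--     for i in range(len(expresion)):
--         if i % 2 == 0:
--             try:
--                 numero = int(expresion[i])
--             except:
--                 return False
--         else:
--             if not expresion[i] in simbolos:
--                 return False
--     return True
-- ===== SOURCE B (Python) =====
-- def _es_numero(token):
--     try:
--         int(token)
--     except:
--         return False
--     return True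
--
--
-- def _valida(tokens):
--     # state machine on the token list: a number, then (operator, number) pairs
--     if not tokens:
--         return True
--     if not _es_numero(tokens[0]):
--         return False
--     if len(tokens) == 1:
--         return True
--     return tokens[1] in "+-*/%" and _valida(tokens[2:])
--
--
-- def analizar_expresion(expresion: str) -> bool:
--     return _valida(expresion.split())
-- ===== Notes on version B (the rewrite author's own statement) =====
-- stated objective: alternative
-- what changed: Replaces A's indexed loop with a parity test at each position by a recursive grammar-style consumer that eats the token list two at a time (a number, then an operator+rest), with no index arithmetic.
import Mathlib
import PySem

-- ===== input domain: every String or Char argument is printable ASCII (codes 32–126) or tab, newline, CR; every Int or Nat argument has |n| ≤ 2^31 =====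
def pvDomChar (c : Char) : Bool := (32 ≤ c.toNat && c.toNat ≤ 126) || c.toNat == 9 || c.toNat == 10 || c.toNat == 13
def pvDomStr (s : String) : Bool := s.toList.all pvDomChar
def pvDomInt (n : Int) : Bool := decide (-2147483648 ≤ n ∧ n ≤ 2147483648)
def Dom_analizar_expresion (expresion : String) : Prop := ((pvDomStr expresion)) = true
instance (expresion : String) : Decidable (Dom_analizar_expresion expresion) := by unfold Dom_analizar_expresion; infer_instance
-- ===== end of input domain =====

-- B replaces A's indexed loop with a parity branch by a recursive grammar-style consumer that eats the token list two at a time (number, then operator + rest); objective: alternative.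

-- ===== PORT A =====
-- 'for i in range(len(expresion))' with early 'return False', ported as recursion over the index list
def analizarGoA (tokens : List String) : List Int → Bool
  | [] => true
  | i :: rest =>
    if PySem.Int.mod i 2 = 0 then
      match PySem.Int.ofStr? (PySem.List.pyGetD tokens i "") with
      | some _ => analizarGoA tokens rest
      | none => false
    else
      if PySem.Str.isIn (PySem.List.pyGetD tokens i "") "+-*/%" then analizarGoA tokens rest
      else false

def analizar_expresion (expresion : String) : Bool :=
  let tokens := PySem.Str.split₀ expresion
  analizarGoA tokens (PySem.List.pyRange 0 tokens.length 1)

-- ===== PORT B =====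
-- _es_numero: int(token) succeeds
def pvEsNumero (token : String) : Bool := (PySem.Int.ofStr? token).isSome

-- _valida: empty ok; head must be a number; singleton ok; else tokens[1] is an operator and recurse on tokens[2:]
def pvValida : List String → Bool
  | [] => true
  | [t] => pvEsNumero t
  | t :: op :: rest =>
    if !pvEsNumero t then false
    else PySem.Str.isIn op "+-*/%" && pvValida rest

def analizar_expresion_alt (expresion : String) : Bool :=
  pvValida (PySem.Str.split₀ expresion)

-- ===== PRECONDITION & SPEC =====
def Spec_analizar_expresion (expresion : String) (out : Bool) : Prop := out = analizar_expresion_alt expresion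
instance (expresion : String) (out : Bool) : Decidable (Spec_analizar_expresion expresion out) := by unfold Spec_analizar_expresion; infer_instance

-- ===== CLAIM (what is proved, stated in full; the proofs are below) =====
def Claim_equal_analizar_expresion : Prop := ∀ (expresion : String), Dom_analizar_expresion expresion → Spec_analizar_expresion expresion (analizar_expresion expresion)

-- ===== LEMMAS AND PROOFS =====

/-- Structural alternating scan: the flag is true when a number is expected. -/
def pvGoS : Bool → List String → Bool
  | _, [] => true
  | true, t :: rest => if pvEsNumero t then pvGoS false rest else false
  | false, t :: rest => if PySem.Str.isIn t "+-*/%" then pvGoS true rest else false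

theorem pv_bridgeA (ts : List String) (k : Nat) :
    analizarGoA ts (PySem.List.pyRange k ts.length 1) = pvGoS (decide (k % 2 = 0)) (ts.drop k) := by
  induction hn : ts.length - k generalizing k with
  | zero =>
    have h1 : (ts.length : Int) ≤ k := by omega
    rw [PySem.List.pyRange_one_eq_nil h1, List.drop_of_length_le (by omega)]
    rfl
  | succ n ih =>
    have hk : k < ts.length := by omega
    rw [PySem.List.pyRange_one_cons (by exact_mod_cast hk), List.drop_eq_getElem_cons hk]
    have hget : PySem.List.pyGetD ts (k : Int) "" = ts[k] := by
      simp [List.getD_eq_getElem?_getD, List.getElem?_eq_getElem hk]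
    have hmod : PySem.Int.mod (k : Int) 2 = ((k % 2 : Nat) : Int) := by
      exact_mod_cast PySem.Int.mod_natCast k 2
    have hrec : analizarGoA ts (PySem.List.pyRange ((k : Int) + 1) ts.length 1)
        = pvGoS (decide ((k + 1) % 2 = 0)) (ts.drop (k + 1)) := by
      have := ih (k + 1) (by omega)
      rw [← this]; norm_num
    have hflip : decide ((k + 1) % 2 = 0) = !decide (k % 2 = 0) := by
      rcases Nat.mod_two_eq_zero_or_one k with h | h <;> simp [h, Nat.add_mod]
    show (if PySem.Int.mod (k : Int) 2 = 0 then _ else _) = _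
    rw [hmod, hget, hrec, hflip]
    have hgT : pvGoS true (ts[k] :: ts.drop (k + 1)) =
        if pvEsNumero ts[k] then pvGoS false (ts.drop (k + 1)) else false := rfl
    have hgF : pvGoS false (ts[k] :: ts.drop (k + 1)) =
        if PySem.Str.isIn ts[k] "+-*/%" then pvGoS true (ts.drop (k + 1)) else false := rfl
    rcases Nat.mod_two_eq_zero_or_one k with h | h
    · have hd : decide (k % 2 = 0) = true := by simp [h]
      rw [hd, Bool.not_true, hgT, h, if_pos (by norm_num : ((0 : Nat) : Int) = 0)]
      cases hof : PySem.Int.ofStr? ts[k] <;> simp [pvEsNumero, hof]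
    · have hd : decide (k % 2 = 0) = false := by simp [h]
      rw [hd, Bool.not_false, hgF, h, if_neg (by norm_num : ¬((1 : Nat) : Int) = 0)]

theorem pv_bridgeB : ∀ (ts : List String), pvGoS true ts = pvValida ts
  | [] => rfl
  | [t] => by cases h : pvEsNumero t <;> simp [pvGoS, pvValida, h]
  | t :: op :: rest => by
    cases h : pvEsNumero t <;> cases h2 : PySem.Str.isIn op "+-*/%" <;>
      simp [pvGoS, pvValida, h, pv_bridgeB rest]

-- ===== VERDICT (by name: the statement is the Claim_ definition above) =====
theorem analizar_expresion_spec : Claim_equal_analizar_expresion := by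
  intro e _
  unfold Spec_analizar_expresion analizar_expresion analizar_expresion_alt
  have h := pv_bridgeA (PySem.Str.split₀ e) 0
  simpa using h.trans (pv_bridgeB (PySem.Str.split₀ e))
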